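-- pv_equiv track=rewrite | github.com/MASantos/DragonCompSci | Algorithms/Sort/Python/SelectionSort.py | aminrec
-- ===== SOURCE A (Python) =====
-- def aminrec(A,i):
-- 	if len(A)-i == 1: return [i,A[i]]
-- 	[im,m] = aminrec(A,i+1) # len = 2000 => max recursion exceeded!
-- 	r = (len(A)-i)//2
-- 	#[im1,m1] = aminrec(A,
-- 	if A[i]<m:
-- 		im = i
-- 		m = A[i]
--
-- 	return [im,m]
-- ===== SOURCE B (Python) =====
-- def aminrec(A, i):
--     im = i
--     m = A[i]
--     for j in range(i + 1, len(A)):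
--         if A[j] <= m:
--             im = j
--             m = A[j]
--     return [im, m]
-- ===== Notes on version B (the rewrite author's own statement) =====
-- stated objective: idiomatic
-- what changed: B replaces A's right-to-left recursion (strict < overwrite) with a single iterative left-to-right scan keeping the best pair and updating on <=, which preserves the rightmost-minimum tie-breaking without recursion.
import Mathlib
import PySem

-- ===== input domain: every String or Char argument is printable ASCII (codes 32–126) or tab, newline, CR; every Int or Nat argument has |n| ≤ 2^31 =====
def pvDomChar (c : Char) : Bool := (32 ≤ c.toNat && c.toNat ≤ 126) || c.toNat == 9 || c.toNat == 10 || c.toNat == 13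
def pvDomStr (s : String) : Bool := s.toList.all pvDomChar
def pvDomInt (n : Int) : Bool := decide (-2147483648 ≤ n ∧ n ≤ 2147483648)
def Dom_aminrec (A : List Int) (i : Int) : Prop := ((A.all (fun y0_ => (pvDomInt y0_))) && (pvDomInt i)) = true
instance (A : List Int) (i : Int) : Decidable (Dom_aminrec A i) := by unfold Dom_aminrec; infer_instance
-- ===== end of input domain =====

-- B is an iterative left-to-right scan (constant space) instead of A's right-to-left recursion.
-- Equivalence is proved on Pre_ = -len(A) ≤ i < len(A): outside it A diverges (i ≥ len, infinite
-- recursion) or raises IndexError (i < -len), so it returns no value there.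

-- ===== PORT A =====
-- A recurses with i+1 until len(A)-i == 1; the fuel (len(A)-i).toNat bounds that recursion
-- exactly (fuel 0 / pattern failures are unreachable when A returns, i.e. on Pre_).
def aminrecFuel (A : List Int) (i : Int) : Nat → List Int
  | 0 => []
  | n + 1 =>
    if (A.length : Int) - i = 1 then
      match PySem.List.pyGet? A i with
      | some v => [i, v]
      | none => []
    else
      match aminrecFuel A (i + 1) n with
      | [im, m] =>
        match PySem.List.pyGet? A i with
        | some ai => if ai < m then [i, ai] else [im, m]
        | none => []
      | _ => []

def aminrec (A : List Int) (i : Int) : List Int :=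
  aminrecFuel A i ((A.length : Int) - i).toNat

-- ===== PORT B =====
def aminrec_alt (A : List Int) (i : Int) : List Int :=
  match PySem.List.pyGet? A i with
  | none => []   -- IndexError in Python B; outside Pre_
  | some m0 =>
    let s := (PySem.List.pyRange (i + 1) (A.length : Int) 1).foldl
      (fun (p : Int × Int) j =>
        match PySem.List.pyGet? A j with
        | none => p   -- unreachable: every j in the range is a valid index
        | some aj => if aj ≤ p.2 then (j, aj) else p)
      (i, m0)
    [s.1, s.2]

-- ===== PRECONDITION & SPEC =====
-- Pre_ excludes i ≥ len(A), where A recurses forever (RecursionError), and i < -len(A),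
-- where both A and B raise IndexError.
def Pre_aminrec (A : List Int) (i : Int) : Prop :=
  -(A.length : Int) ≤ i ∧ i < (A.length : Int)
instance (A : List Int) (i : Int) : Decidable (Pre_aminrec A i) := by
  unfold Pre_aminrec; infer_instance

def pvWitness_aminrec : List Int × Int := ([3, 1, 2], 0)

def Spec_aminrec (A : List Int) (i : Int) (out : List Int) : Prop := out = aminrec_alt A i
instance (A : List Int) (i : Int) (out : List Int) : Decidable (Spec_aminrec A i out) := by
  unfold Spec_aminrec; infer_instance

-- ===== CLAIM (what is proved, stated in full; the proofs are below) =====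
def Claim_equal_aminrec : Prop :=
  ∀ (A : List Int) (i : Int), Dom_aminrec A i → Pre_aminrec A i →
    Spec_aminrec A i (aminrec A i)

-- ===== LEMMAS AND PROOFS =====

-- the pure left fold B performs, over (index, value) pairs
def fL (p : Int × Int) (l : List (Int × Int)) : Int × Int :=
  l.foldl (fun r q => if q.2 ≤ r.2 then q else r) p

-- the value of a valid index (total stand-in for A[j] under Pre_)
def gA (A : List Int) (j : Int) : Int := (PySem.List.pyGet? A j).getD 0

theorem fL_snd_le (l : List (Int × Int)) : ∀ p : Int × Int, (fL p l).2 ≤ p.2 := by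
  induction l with
  | nil => intro p; simp [fL]
  | cons q t ih =>
    intro p
    simp only [fL, List.foldl_cons] at *
    by_cases h : q.2 ≤ p.2
    · simp only [h, if_pos]
      exact le_trans (ih q) h
    · simp only [h, if_neg, not_false_iff]
      exact ih p

theorem fL_lt (l : List (Int × Int)) :
    ∀ p q : Int × Int, p.2 < q.2 → fL p l = if p.2 < (fL q l).2 then p else fL q l := by
  induction l with
  | nil => intro p q h; simp [fL, h]
  | cons r t ih =>
    intro p q h
    simp only [fL, List.foldl_cons] at *
    by_cases hrp : r.2 ≤ p.2
    · have hrq : r.2 ≤ q.2 := le_trans hrp (le_of_lt h)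
      simp only [hrp, if_pos, hrq]
      have := fL_snd_le t r
      simp only [fL] at this
      rw [if_neg (by omega)]
    · by_cases hrq : r.2 ≤ q.2
      · simp only [hrp, if_neg, not_false_iff, hrq, if_pos]
        exact ih p r (by omega)
      · simp only [hrp, if_neg, not_false_iff, hrq]
        exact ih p q h
  
theorem fL_cons (p q : Int × Int) (t : List (Int × Int)) :
    fL p (q :: t) = if p.2 < (fL q t).2 then p else fL q t := by
  simp only [fL, List.foldl_cons]
  by_cases h : q.2 ≤ p.2
  · simp only [h, if_pos]
    have := fL_snd_le t q
    simp only [fL] at this ⊢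
    rw [if_neg (by omega)]
  · have := fL_lt t p q (by omega)
    simp only [fL] at this
    simp only [h, if_neg, not_false_iff]
    exact this

theorem pyGet?_eq_some_gA (A : List Int) (i : Int)
    (h0 : -(A.length : Int) ≤ i) (h1 : i < (A.length : Int)) :
    PySem.List.pyGet? A i = some (gA A i) := by
  have hne : PySem.List.pyGet? A i ≠ none := by
    intro hc
    rw [PySem.List.pyGet?_eq_none_iff] at hc
    exact hc ⟨h0, h1⟩
  obtain ⟨v, hv⟩ := Option.ne_none_iff_exists'.mp hne
  rw [hv]; simp [gA, hv]

-- B's raw fold equals the pure fold fL over the mapped pairs, for valid index lists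
theorem foldl_match_eq (A : List Int) (js : List Int)
    (h : ∀ j ∈ js, -(A.length : Int) ≤ j ∧ j < (A.length : Int)) :
    ∀ p : Int × Int,
      js.foldl (fun (p : Int × Int) j =>
          match PySem.List.pyGet? A j with
          | none => p
          | some aj => if aj ≤ p.2 then (j, aj) else p) p
        = fL p (js.map (fun j => (j, gA A j))) := by
  induction js with
  | nil => intro p; simp [fL]
  | cons j t ih =>
    intro p
    have hj := h j (by simp)
    rw [List.foldl_cons, List.map_cons]
    rw [pyGet?_eq_some_gA A j hj.1 hj.2]
    simp only [fL, List.foldl_cons]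
    have ih' := ih (fun j hj => h j (by simp [hj]))
    by_cases hle : gA A j ≤ p.2
    · simp only [hle, if_pos]; exact ih' _
    · simp only [hle, if_neg, not_false_iff]; exact ih' _

-- the common characterisation of both ports: the fold started at (i, A[i]) over i+1 … len-1
def bestFrom (A : List Int) (i : Int) : Int × Int :=
  fL (i, gA A i) ((PySem.List.pyRange (i + 1) (A.length : Int) 1).map (fun j => (j, gA A j)))

theorem aminrecFuel_eq_bestFrom (A : List Int) :
    ∀ (n : Nat) (i : Int), 1 ≤ n → -(A.length : Int) ≤ i → (A.length : Int) - i = n →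
      aminrecFuel A i n = [(bestFrom A i).1, (bestFrom A i).2] := by
  intro n
  induction n with
  | zero => intro i h; omega
  | succ m ih =>
    intro i _ h0 hlen
    by_cases hbase : (A.length : Int) - i = 1
    · -- i = len - 1: the range is empty, the fold returns its start
      have hi1 : i < (A.length : Int) := by omega
      rw [aminrecFuel, if_pos hbase, pyGet?_eq_some_gA A i h0 hi1]
      rw [bestFrom, PySem.List.pyRange_one_eq_nil (by omega)]
      simp [fL]
    · -- i < len - 1: peel the head i+1 off the range and use fL_cons
      have hm : 1 ≤ m := by omega
      have hi1 : i < (A.length : Int) := by omega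
      have hsplit : bestFrom A i =
          if gA A i < (bestFrom A (i + 1)).2 then (i, gA A i) else bestFrom A (i + 1) := by
        simp only [bestFrom]
        rw [PySem.List.pyRange_one_cons (show i + 1 < (A.length : Int) by omega),
          List.map_cons, fL_cons]
      rw [aminrecFuel, if_neg hbase,
        ih (i + 1) hm (by omega) (by omega),
        pyGet?_eq_some_gA A i h0 hi1, hsplit]
      dsimp only
      by_cases hc : gA A i < (bestFrom A (i + 1)).2
      · simp [hc]
      · simp [hc]

-- ===== VERDICT (by name: the statement is the Claim_ definition above) =====
theorem aminrec_spec : Claim_equal_aminrec := by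
  intro A i _ hpre
  obtain ⟨h0, h1⟩ := hpre
  unfold Spec_aminrec aminrec aminrec_alt
  rw [pyGet?_eq_some_gA A i h0 h1]
  have hfold := foldl_match_eq A (PySem.List.pyRange (i + 1) (A.length : Int) 1)
    (by
      intro j hj
      rw [PySem.List.mem_pyRange_one] at hj
      exact ⟨by omega, hj.2⟩)
    (i, gA A i)
  simp only [hfold]
  have hn : ((A.length : Int) - i).toNat = ((A.length : Int) - i).toNat := rfl
  rw [aminrecFuel_eq_bestFrom A (((A.length : Int) - i).toNat) i (by omega) h0 (by omega)]
  rfl
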